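-- pv_equiv track=rewrite | github.com/Maryam99911/projetchatbot | LoadGlobal.py | construire_contextes_consommation_electricite
-- ===== SOURCE A (Python) =====
-- def construire_contextes_consommation_electricite(data):
--     contexts = []
--     for entry in data:
--         location = entry.get('location', 'lieu inconnu')
--         maupertuis = entry.get('batiment_maupertuis', 'inconnu')
--         bibliotheque = entry.get('batiment_bibliotheque_universitaire', 'inconnu')
--         pelvoux = entry.get('iup_pelvoux', 'inconnu')
--         romero = entry.get('batiment_iut_romero', 'inconnu')
--         rostand = entry.get('iut_rostand', 'inconnu')
--         ibgbi = entry.get('batiment_ibgbi', 'inconnu')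
--         premiers_cycles = entry.get('batiment_premiers_cycles', 'inconnu')
--         facteur_cheval = entry.get('batiment_facteur_cheval', 'inconnu')
--         ile_de_france = entry.get('batiment_ile_de_france', 'inconnu')
--         bretigny = entry.get('iut_bretigny', 'inconnu')
--
--         context = (f"Pour la date '{location}', la consommation d'électricité était de :\n"
--                    f"- Maupertuis : {maupertuis} kWh\n"
--                    f"- Bibliothèque Universitaire : {bibliotheque} kWh\n"
--                    f"- IUP Pelvoux : {pelvoux} kWh\n"
--                    f"- IUT Romero : {romero} kWh\n"
--                    f"- IUT Rostand : {rostand} kWh\n"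
--                    f"- IBGBI : {ibgbi} kWh\n"
--                    f"- Premiers Cycles : {premiers_cycles} kWh\n"
--                    f"- Facteur Cheval : {facteur_cheval} kWh\n"
--                    f"- Île de France : {ile_de_france} kWh\n"
--                    f"- IUT Brétigny : {bretigny} kWh")
--         contexts.append(context)
--     return contexts
-- ===== SOURCE B (Python) =====
-- _CHAMPS = [
--     ("batiment_maupertuis", "Maupertuis"),
--     ("batiment_bibliotheque_universitaire", "Bibliothèque Universitaire"),
--     ("iup_pelvoux", "IUP Pelvoux"),
--     ("batiment_iut_romero", "IUT Romero"),
--     ("iut_rostand", "IUT Rostand"),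
--     ("batiment_ibgbi", "IBGBI"),
--     ("batiment_premiers_cycles", "Premiers Cycles"),
--     ("batiment_facteur_cheval", "Facteur Cheval"),
--     ("batiment_ile_de_france", "Île de France"),
--     ("iut_bretigny", "IUT Brétigny"),
-- ]
--
-- def construire_contextes_consommation_electricite(data):
--     return [
--         "\n".join(
--             [f"Pour la date '{entry.get('location', 'lieu inconnu')}', la consommation d'électricité était de :"]
--             + [f"- {label} : {entry.get(key, 'inconnu')} kWh" for key, label in _CHAMPS]
--         )
--         for entry in data
--     ]
-- ===== Notes on version B (the rewrite author's own statement) =====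
-- stated objective: simpler
-- what changed: Replaces the eleven per-building local variables and one hard-coded multi-line f-string with a (key,label) table driving a line-building loop whose lines are joined with '\n', as a list comprehension.
import Mathlib
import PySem

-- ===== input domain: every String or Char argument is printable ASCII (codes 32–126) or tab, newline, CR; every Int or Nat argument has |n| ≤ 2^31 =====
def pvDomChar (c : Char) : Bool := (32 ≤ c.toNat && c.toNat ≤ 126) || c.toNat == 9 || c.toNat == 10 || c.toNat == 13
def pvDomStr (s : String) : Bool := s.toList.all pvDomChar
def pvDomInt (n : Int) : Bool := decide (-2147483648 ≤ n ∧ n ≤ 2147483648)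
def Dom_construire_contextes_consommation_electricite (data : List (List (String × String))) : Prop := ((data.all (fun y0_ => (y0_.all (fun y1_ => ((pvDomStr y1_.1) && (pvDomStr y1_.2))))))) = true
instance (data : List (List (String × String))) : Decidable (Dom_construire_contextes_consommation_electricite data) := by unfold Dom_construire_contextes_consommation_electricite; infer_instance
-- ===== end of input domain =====

-- B replaces A's eleven hard-coded locals and one big f-string by a (key,label) table
-- driving a per-line loop joined with "\n" (objective: simpler). Return-value equivalence only.

-- ===== PORT A =====
def construire_contextes_consommation_electricite (data : List (List (String × String))) : List String :=
  data.foldl (fun contexts entry =>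
    let d := PySem.Dict.ofList entry
    let location := d.getD "location" "lieu inconnu"
    let maupertuis := d.getD "batiment_maupertuis" "inconnu"
    let bibliotheque := d.getD "batiment_bibliotheque_universitaire" "inconnu"
    let pelvoux := d.getD "iup_pelvoux" "inconnu"
    let romero := d.getD "batiment_iut_romero" "inconnu"
    let rostand := d.getD "iut_rostand" "inconnu"
    let ibgbi := d.getD "batiment_ibgbi" "inconnu"
    let premiers_cycles := d.getD "batiment_premiers_cycles" "inconnu"
    let facteur_cheval := d.getD "batiment_facteur_cheval" "inconnu"
    let ile_de_france := d.getD "batiment_ile_de_france" "inconnu"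
    let bretigny := d.getD "iut_bretigny" "inconnu"
    let context :=
      "Pour la date '" ++ location ++ "', la consommation d'électricité était de :\n" ++
      "- Maupertuis : " ++ maupertuis ++ " kWh\n" ++
      "- Bibliothèque Universitaire : " ++ bibliotheque ++ " kWh\n" ++
      "- IUP Pelvoux : " ++ pelvoux ++ " kWh\n" ++
      "- IUT Romero : " ++ romero ++ " kWh\n" ++
      "- IUT Rostand : " ++ rostand ++ " kWh\n" ++
      "- IBGBI : " ++ ibgbi ++ " kWh\n" ++
      "- Premiers Cycles : " ++ premiers_cycles ++ " kWh\n" ++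
      "- Facteur Cheval : " ++ facteur_cheval ++ " kWh\n" ++
      "- Île de France : " ++ ile_de_france ++ " kWh\n" ++
      "- IUT Brétigny : " ++ bretigny ++ " kWh"
    contexts ++ [context]) []

-- ===== PORT B =====
def pvChamps : List (String × String) :=
  [("batiment_maupertuis", "Maupertuis"),
   ("batiment_bibliotheque_universitaire", "Bibliothèque Universitaire"),
   ("iup_pelvoux", "IUP Pelvoux"),
   ("batiment_iut_romero", "IUT Romero"),
   ("iut_rostand", "IUT Rostand"),
   ("batiment_ibgbi", "IBGBI"),
   ("batiment_premiers_cycles", "Premiers Cycles"),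
   ("batiment_facteur_cheval", "Facteur Cheval"),
   ("batiment_ile_de_france", "Île de France"),
   ("iut_bretigny", "IUT Brétigny")]

def construire_contextes_consommation_electricite_alt (data : List (List (String × String))) : List String :=
  data.map (fun entry =>
    let d := PySem.Dict.ofList entry
    PySem.Str.join "\n"
      (("Pour la date '" ++ d.getD "location" "lieu inconnu" ++ "', la consommation d'électricité était de :") ::
       pvChamps.map (fun kl => "- " ++ kl.2 ++ " : " ++ d.getD kl.1 "inconnu" ++ " kWh")))

-- ===== PRECONDITION & SPEC =====
def Spec_construire_contextes_consommation_electricite (data : List (List (String × String))) (out : List String) : Prop := out = construire_contextes_consommation_electricite_alt data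
instance (data : List (List (String × String))) (out : List String) : Decidable (Spec_construire_contextes_consommation_electricite data out) := by unfold Spec_construire_contextes_consommation_electricite; infer_instance

-- ===== CLAIM (what is proved, stated in full; the proofs are below) =====
def Claim_equal_construire_contextes_consommation_electricite : Prop := ∀ (data : List (List (String × String))), Dom_construire_contextes_consommation_electricite data → Spec_construire_contextes_consommation_electricite data (construire_contextes_consommation_electricite data)

-- ===== LEMMAS AND PROOFS =====
theorem pv_foldl_append_map {α β : Type} (f : α → β) (l : List α) (acc : List β) :
    l.foldl (fun a x => a ++ [f x]) acc = acc ++ l.map f := by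
  induction l generalizing acc with
  | nil => simp
  | cons x xs ih => simp [List.foldl, ih]

-- ===== VERDICT (by name: the statement is the Claim_ definition above) =====
set_option maxRecDepth 8192 in
theorem construire_contextes_consommation_electricite_spec : Claim_equal_construire_contextes_consommation_electricite := by
  intro data _
  unfold Spec_construire_contextes_consommation_electricite
    construire_contextes_consommation_electricite construire_contextes_consommation_electricite_alt
  rw [pv_foldl_append_map]
  simp only [List.nil_append]
  apply List.map_congr_left
  intro entry _
  apply String.toList_injective
  simp [pvChamps, PySem.Str.join, PySem.Chars.join, List.intercalate]
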